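-- pv_equiv track=rewrite | github.com/daniel-reich/ubiquitous-fiesta | PPz4PqTJ5mXXa4MrW_2.py | ulaml
-- ===== SOURCE A (Python) =====
-- def ulaml(n):
--   if n==2:
--     return [1,2],{3:1}
--   lnml,lnmls=ulaml(n-1)
--   nn=min([x for x in lnmls if x>lnml[-1] and lnmls[x]==1])
--   l=lnml+[nn]
--   for x in lnml:
--     if nn+x in lnmls:
--       lnmls[nn+x]+=1
--     else:
--       lnmls[nn+x]=1
--   return l,lnmls
-- ===== SOURCE B (Python) =====
-- def ulaml(n):
--   l = [1, 2]
--   cnt = {3: 1}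
--   singles = {3}
--   for _ in range(n - 2):
--     last = l[-1]
--     nn = min(x for x in singles if x > last)
--     for x in l:
--       s = nn + x
--       if s in cnt:
--         cnt[s] += 1
--         singles.discard(s)
--       else:
--         cnt[s] = 1
--         singles.add(s)
--     l.append(nn)
--   return l, cnt
-- ===== Notes on version B (the rewrite author's own statement) =====
-- stated objective: faster
-- what changed: Replaced A's recursion (depth n) and per-step rescan of the entire pairwise-sum dict by an iterative loop that incrementally maintains the set of count-1 sums, so each step only scans that smaller set instead of all dict keys (intended as faster; a timing run measured ~4x at its largest sizes).
import Mathlib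
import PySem

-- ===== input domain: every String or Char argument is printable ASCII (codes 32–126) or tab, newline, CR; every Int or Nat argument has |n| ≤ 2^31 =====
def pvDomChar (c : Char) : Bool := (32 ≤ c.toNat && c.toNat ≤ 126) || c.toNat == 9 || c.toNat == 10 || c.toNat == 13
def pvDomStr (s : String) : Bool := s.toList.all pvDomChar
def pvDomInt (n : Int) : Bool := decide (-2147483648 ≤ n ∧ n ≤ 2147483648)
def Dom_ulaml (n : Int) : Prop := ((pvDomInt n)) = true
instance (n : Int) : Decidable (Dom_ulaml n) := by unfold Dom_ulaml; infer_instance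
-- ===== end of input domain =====

-- B replaces A's recursion + per-step rescan of the whole dict by an iterative loop that
-- incrementally maintains the set of count-1 sums (objective: faster; intended constant-factor, measured ~4x in a timing run).

-- ===== PORT A =====
-- the body of one recursive level of A, after the recursive call (kept as a named helper)
def ulamlStep (lnml : List Int) (lnmls : PySem.Dict Int Int) :
    List Int × PySem.Dict Int Int :=
  let last := (PySem.List.pyGet? lnml (-1)).getD 0      -- lnml[-1]; lnml is never empty here
  let nn := (PySem.List.min?
    ((PySem.Dict.keys lnmls).filter
      (fun x => decide (last < x) && (PySem.Dict.getD lnmls x 0 == 1)))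
    (fun x => x)).getD 0                                -- min([...]); the list is never empty here
  let l := lnml ++ [nn]
  let lnmls' := lnml.foldl (fun d x =>
    if PySem.Dict.contains d (nn + x) then PySem.Dict.modify d (nn + x) 0 (· + 1)
    else PySem.Dict.insert d (nn + x) 1) lnmls
  (l, lnmls')

-- A's recursion, with fuel making the descent structural; fuel = n - 2 exactly
def ulamlGo : Nat → Int → List Int × PySem.Dict Int Int
  | fuel, n =>
    if n == 2 then ([1, 2], PySem.Dict.ofList [(3, 1)])
    else match fuel with
      | 0 => ([], PySem.Dict.empty)   -- fuel exhausted: unreachable under Pre_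
      | fuel + 1 =>
        let (lnml, lnmls) := ulamlGo fuel (n - 1)
        ulamlStep lnml lnmls

def ulaml (n : Int) : List Int × (List (Int × Int)) :=
  let (l, d) := ulamlGo (n - 2).toNat n
  (l, d.items)

-- ===== PORT B =====
-- inner loop body of Source B: update cnt and the count-1 set `singles` for the sum nn + x
def ulamlAltInner (nn : Int) (st : PySem.Dict Int Int × PySem.Set Int) (x : Int) :
    PySem.Dict Int Int × PySem.Set Int :=
  let s := nn + x
  if PySem.Dict.contains st.1 s then
    (PySem.Dict.modify st.1 s 0 (· + 1), PySem.Set.discard st.2 s)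
  else
    (PySem.Dict.insert st.1 s 1, PySem.Set.add st.2 s)

-- one iteration of Source B's main loop
-- (the min over the set `singles` has a unique minimum value, so it is hash-order independent)
def ulamlAltStep (st : List Int × PySem.Dict Int Int × PySem.Set Int) :
    List Int × PySem.Dict Int Int × PySem.Set Int :=
  let l := st.1
  let last := (PySem.List.pyGet? l (-1)).getD 0         -- l[-1]; l is never empty here
  let nn := (PySem.List.min? ((st.2.2).filter (fun x => decide (last < x))) (fun x => x)).getD 0
  let cs := l.foldl (ulamlAltInner nn) (st.2.1, st.2.2)
  (l ++ [nn], cs.1, cs.2)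

-- `for _ in range(n - 2)`: iterate the step from the initial state
def ulamlAltLoop : Nat → List Int × PySem.Dict Int Int × PySem.Set Int
  | 0 => ([1, 2], PySem.Dict.ofList [(3, 1)], PySem.Set.ofList [3])
  | k + 1 => ulamlAltStep (ulamlAltLoop k)

def ulaml_alt (n : Int) : List Int × (List (Int × Int)) :=
  let st := ulamlAltLoop (n - 2).toNat
  (st.1, st.2.1.items)

-- ===== PRECONDITION & SPEC =====
-- Pre_ excludes inputs below the recursion base case, where A never returns (RecursionError).
def Pre_ulaml (n : Int) : Prop := 2 ≤ n
instance (n : Int) : Decidable (Pre_ulaml n) := by unfold Pre_ulaml; infer_instance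
def pvWitness_ulaml : Int := (5)

def Spec_ulaml (n : Int) (out : List Int × (List (Int × Int))) : Prop := out = ulaml_alt n
instance (n : Int) (out : List Int × (List (Int × Int))) : Decidable (Spec_ulaml n out) := by unfold Spec_ulaml; infer_instance

-- ===== CLAIM (what is proved, stated in full; the proofs are below) =====
def Claim_equal_ulaml : Prop := ∀ (n : Int), Dom_ulaml n → Pre_ulaml n → Spec_ulaml n (ulaml n)

-- ===== LEMMAS AND PROOFS =====

-- invariant: `singles` holds exactly the keys of the dict whose count is 1,
-- and every stored count is ≥ 1
def UlamlInv (d : PySem.Dict Int Int) (s : PySem.Set Int) : Prop :=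
  (∀ k : Int, k ∈ s ↔ (PySem.Dict.contains d k = true ∧ PySem.Dict.getD d k 0 = 1)) ∧
  (∀ k : Int, PySem.Dict.contains d k = true → 1 ≤ PySem.Dict.getD d k 0)

-- two Int lists with the same members have the same min
lemma min?_eq_of_mem_iff (xs ys : List Int) (h : ∀ a, a ∈ xs ↔ a ∈ ys) :
    PySem.List.min? xs (fun x => x) = PySem.List.min? ys (fun x => x) := by
  cases hx : PySem.List.min? xs (fun x => x) with
  | none =>
    rw [PySem.List.min?_eq_none_iff] at hx
    symm; rw [PySem.List.min?_eq_none_iff]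
    cases ys with
    | nil => rfl
    | cons b t => exact absurd ((h b).mpr (List.mem_cons_self)) (by simp [hx])
  | some m =>
    cases hy : PySem.List.min? ys (fun x => x) with
    | none =>
      rw [PySem.List.min?_eq_none_iff] at hy
      have := PySem.List.min?_mem hx
      rw [h m, hy] at this; simp at this
    | some m' =>
      have hm := PySem.List.min?_mem hx
      have hm' := PySem.List.min?_mem hy
      have h1 := PySem.List.min?_isMin hx m' ((h m').mpr hm')
      have h2 := PySem.List.min?_isMin hy m ((h m).mp hm)
      exact congrArg some (le_antisymm h1 h2)

-- one inner-loop step: B's dict component follows A's update, and the invariant is kept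
lemma inner_step (nn x : Int) (d : PySem.Dict Int Int) (s : PySem.Set Int)
    (hinv : UlamlInv d s) :
    (ulamlAltInner nn (d, s) x).1 =
      (if PySem.Dict.contains d (nn + x) then PySem.Dict.modify d (nn + x) 0 (· + 1)
       else PySem.Dict.insert d (nn + x) 1) ∧
    UlamlInv (ulamlAltInner nn (d, s) x).1 (ulamlAltInner nn (d, s) x).2 := by
  obtain ⟨hmem, hpos⟩ := hinv
  unfold ulamlAltInner
  cases hc : PySem.Dict.contains d (nn + x) with
  | true =>
    simp only [hc, if_true]
    refine ⟨trivial, ?_, ?_⟩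
    · intro k
      rw [PySem.Set.mem_discard, PySem.Dict.contains_modify, PySem.Dict.getD_modify]
      by_cases hk : k = nn + x
      · subst hk
        have := hpos _ hc
        simp [hmem]
        omega
      · simp only [hk, if_false, hmem k]
        constructor
        · rintro ⟨⟨h1, h2⟩, _⟩; simp [h1, h2]
        · rintro ⟨h1, h2⟩
          have : k = nn + x ∨ PySem.Dict.contains d k = true := by
            by_cases hh : k = nn + x
            · exact Or.inl hh
            · right
              simpa [hh] using h1
          exact ⟨⟨this.resolve_left hk, h2⟩, hk⟩
    · intro k
      rw [PySem.Dict.contains_modify, PySem.Dict.getD_modify]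
      by_cases hk : k = nn + x
      · subst hk; have := hpos _ hc; simp; omega
      · simp only [hk, if_false]
        intro h
        have : PySem.Dict.contains d k = true := by simpa [hk] using h
        exact hpos k this
  | false =>
    simp only [hc, if_false, Bool.false_eq_true]
    refine ⟨trivial, ?_, ?_⟩
    · intro k
      rw [PySem.Set.mem_add, PySem.Dict.contains_insert, PySem.Dict.getD_insert]
      by_cases hk : k = nn + x
      · subst hk; simp
      · simp only [hk, if_false, hmem k]
        constructor
        · rintro (⟨h1, h2⟩ | h)
          · exact ⟨by simp [h1], h2⟩
          · exact h.elim
        · rintro ⟨h1, h2⟩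
          have : PySem.Dict.contains d k = true := by simpa [hk] using h1
          exact Or.inl ⟨this, h2⟩
    · intro k
      rw [PySem.Dict.contains_insert, PySem.Dict.getD_insert]
      by_cases hk : k = nn + x
      · subst hk; simp
      · simp only [hk, if_false]
        intro h
        exact hpos k (by simpa [hk] using h)

-- the whole inner fold: dict components agree and the invariant survives
lemma inner_fold (nn : Int) (l : List Int) :
    ∀ (d : PySem.Dict Int Int) (s : PySem.Set Int), UlamlInv d s →
    (l.foldl (ulamlAltInner nn) (d, s)).1 =
      l.foldl (fun d x =>
        if PySem.Dict.contains d (nn + x) then PySem.Dict.modify d (nn + x) 0 (· + 1)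
        else PySem.Dict.insert d (nn + x) 1) d ∧
    UlamlInv (l.foldl (ulamlAltInner nn) (d, s)).1 (l.foldl (ulamlAltInner nn) (d, s)).2 := by
  induction l with
  | nil => intro d s h; exact ⟨rfl, h⟩
  | cons x t ih =>
    intro d s h
    obtain ⟨h1, h2⟩ := inner_step nn x d s h
    simp only [List.foldl_cons]
    have : ulamlAltInner nn (d, s) x =
        ((ulamlAltInner nn (d, s) x).1, (ulamlAltInner nn (d, s) x).2) := rfl
    rw [this]
    obtain ⟨ih1, ih2⟩ := ih _ _ h2
    exact ⟨by rw [ih1, h1], ih2⟩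

-- one outer iteration: same new element (min over equal member sets), same dict
lemma outer_step (l : List Int) (d : PySem.Dict Int Int) (s : PySem.Set Int)
    (hinv : UlamlInv d s) :
    (ulamlAltStep (l, d, s)).1 = (ulamlStep l d).1 ∧
    (ulamlAltStep (l, d, s)).2.1 = (ulamlStep l d).2 ∧
    UlamlInv (ulamlAltStep (l, d, s)).2.1 (ulamlAltStep (l, d, s)).2.2 := by
  have hmin : ∀ last : Int,
      PySem.List.min? (s.filter (fun x => decide (last < x))) (fun x => x) =
      PySem.List.min? ((PySem.Dict.keys d).filter
        (fun x => decide (last < x) && (PySem.Dict.getD d x 0 == 1))) (fun x => x) := by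
    intro last
    apply min?_eq_of_mem_iff
    intro a
    simp only [List.mem_filter, Bool.and_eq_true, decide_eq_true_eq, beq_iff_eq]
    rw [← PySem.Dict.contains_iff_mem_keys]
    obtain ⟨hmem, _⟩ := hinv
    rw [hmem a]
    tauto
  unfold ulamlAltStep ulamlStep
  simp only [hmin]
  obtain ⟨f1, f2⟩ := inner_fold
    ((PySem.List.min? ((PySem.Dict.keys d).filter
      (fun x => decide (((PySem.List.pyGet? l (-1)).getD 0) < x) && (PySem.Dict.getD d x 0 == 1)))
      (fun x => x)).getD 0) l d s hinv
  exact ⟨trivial, by rw [f1], f2⟩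

lemma base_contains (k : Int) (hk : ¬ k = 3) :
    PySem.Dict.contains (PySem.Dict.ofList [((3 : Int), (1 : Int))]) k = false := by
  show PySem.Dict.contains (PySem.Dict.mk [(3, 1)]) k = false
  simp [PySem.Dict.contains_mk]
  exact fun e => hk e.symm

lemma base_inv : UlamlInv (PySem.Dict.ofList [(3, 1)]) (PySem.Set.ofList [3]) := by
  constructor
  · intro k
    by_cases hk : k = 3
    · subst hk; decide
    · rw [PySem.Set.mem_ofList]
      simp only [List.mem_singleton, hk, false_iff]
      rintro ⟨h, -⟩
      rw [base_contains k hk] at h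
      cases h
  · intro k h
    by_cases hk : k = 3
    · subst hk; decide
    · rw [base_contains k hk] at h
      cases h

-- A's recursion at fuel k computes the same list and dict as B's loop after k iterations
lemma loop_eq (k : Nat) :
    (ulamlAltLoop k).1 = (ulamlGo k ((k : Int) + 2)).1 ∧
    (ulamlAltLoop k).2.1 = (ulamlGo k ((k : Int) + 2)).2 ∧
    UlamlInv (ulamlAltLoop k).2.1 (ulamlAltLoop k).2.2 := by
  induction k with
  | zero => exact ⟨rfl, rfl, base_inv⟩
  | succ k ih =>
    obtain ⟨ih1, ih2, ih3⟩ := ih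
    have hne : ((((k : Nat) + 1 : Nat) : Int) + 2 == 2) = false := by
      simp; omega
    have hsub : ((((k : Nat) + 1 : Nat) : Int) + 2) - 1 = ((k : Int) + 2) := by push_cast; ring
    have hgo : ulamlGo (k + 1) (((k + 1 : Nat) : Int) + 2) =
        ulamlStep (ulamlGo k ((k : Int) + 2)).1 (ulamlGo k ((k : Int) + 2)).2 := by
      conv_lhs => rw [ulamlGo]
      rw [hne]
      simp only [Bool.false_eq_true, if_false, hsub]
    have hloop : ulamlAltLoop (k + 1) = ulamlAltStep (ulamlAltLoop k) := rfl
    have heta : (ulamlAltLoop k) =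
        ((ulamlAltLoop k).1, (ulamlAltLoop k).2.1, (ulamlAltLoop k).2.2) := rfl
    rw [hloop, hgo, ← ih1, ← ih2]
    have hstep := outer_step (ulamlAltLoop k).1 (ulamlAltLoop k).2.1 (ulamlAltLoop k).2.2 ih3
    rw [← heta] at hstep
    exact hstep

-- ===== VERDICT (by name: the statement is the Claim_ definition above) =====
theorem ulaml_spec : Claim_equal_ulaml := by
  intro n _ hpre
  have hk : ((((n - 2).toNat : Nat) : Int) + 2) = n := by
    unfold Pre_ulaml at hpre; omega
  obtain ⟨h1, h2, _⟩ := loop_eq (n - 2).toNat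
  unfold Spec_ulaml ulaml ulaml_alt
  rw [hk] at h1 h2
  simp [h1, h2]
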